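-- pv_equiv track=rewrite | github.com/Unitary-orz/opclash_cli | opclash_cli/commands/subscription.py | _classify_block
-- ===== SOURCE A (Python) =====
-- def _classify_block(lines: list[str]) -> str:
--     if any("Update Successful!" in line for line in lines):
--         return "updated"
--     if any("No Change, Do Nothing!" in line for line in lines):
--         return "unchanged"
--     if any(
--         marker in line
--         for line in lines
--         for marker in ("Update Error", "Subscribed Failed", "Download Failed", "Error:")
--     ):
--         return "failed"
--     return "failed"
-- ===== SOURCE B (Python) =====
-- def _classify_block(lines: list[str]) -> str:
--     has_updated = False
--     has_unchanged = False
--     for line in lines: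
--         if "Update Successful!" in line:
--             has_updated = True
--         if "No Change, Do Nothing!" in line:
--             has_unchanged = True
--     if has_updated:
--         return "updated"
--     if has_unchanged:
--         return "unchanged"
--     return "failed"
-- ===== Notes on version B (the rewrite author's own statement) =====
-- stated objective: simpler
-- what changed: Replaces three separate any(...) scans (one with a dead failed-marker check) by one flag-collecting pass over lines followed by a priority return; the failed-marker scan is dropped since both its branch and the fallback return 'failed'.
import Mathlib
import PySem

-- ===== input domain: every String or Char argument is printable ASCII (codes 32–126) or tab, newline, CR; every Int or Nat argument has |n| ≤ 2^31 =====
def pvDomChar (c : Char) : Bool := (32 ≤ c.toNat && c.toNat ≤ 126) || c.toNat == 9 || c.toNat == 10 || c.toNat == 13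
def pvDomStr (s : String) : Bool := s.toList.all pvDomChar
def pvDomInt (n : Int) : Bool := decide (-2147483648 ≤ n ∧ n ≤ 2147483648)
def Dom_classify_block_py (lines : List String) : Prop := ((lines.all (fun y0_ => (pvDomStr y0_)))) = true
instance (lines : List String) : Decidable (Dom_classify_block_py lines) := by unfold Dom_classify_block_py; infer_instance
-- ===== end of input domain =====

-- B replaces A's three any(...) scans (one dead) by a single flag-collecting pass; objective: simpler.

-- ===== PORT A =====
def classify_block_py (lines : List String) : String :=
  if lines.any (fun line => PySem.Str.isIn "Update Successful!" line) then "updated"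
  else if lines.any (fun line => PySem.Str.isIn "No Change, Do Nothing!" line) then "unchanged"
  else if lines.any (fun line =>
      ["Update Error", "Subscribed Failed", "Download Failed", "Error:"].any
        (fun marker => PySem.Str.isIn marker line)) then "failed"
  else "failed"

-- ===== PORT B =====
def classify_block_py_alt (lines : List String) : String :=
  let flags := lines.foldl
    (fun (st : Bool × Bool) line =>
      ((if PySem.Str.isIn "Update Successful!" line then true else st.1),
       (if PySem.Str.isIn "No Change, Do Nothing!" line then true else st.2)))
    (false, false)
  if flags.1 then "updated"
  else if flags.2 then "unchanged"
  else "failed"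

-- ===== PRECONDITION & SPEC =====
def Spec_classify_block_py (lines : List String) (out : String) : Prop := out = classify_block_py_alt lines
instance (lines : List String) (out : String) : Decidable (Spec_classify_block_py lines out) := by unfold Spec_classify_block_py; infer_instance

-- ===== CLAIM (what is proved, stated in full; the proofs are below) =====
def Claim_equal_classify_block_py : Prop := ∀ (lines : List String), Dom_classify_block_py lines → Spec_classify_block_py lines (classify_block_py lines)

-- ===== LEMMAS AND PROOFS =====
theorem pv_foldl_flags (lines : List String) (u c : Bool) :
    lines.foldl
      (fun (st : Bool × Bool) line =>
        ((if PySem.Str.isIn "Update Successful!" line then true else st.1),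
         (if PySem.Str.isIn "No Change, Do Nothing!" line then true else st.2)))
      (u, c)
    = (u || lines.any (fun line => PySem.Str.isIn "Update Successful!" line),
       c || lines.any (fun line => PySem.Str.isIn "No Change, Do Nothing!" line)) := by
  induction lines generalizing u c with
  | nil => simp
  | cons hd tl ih =>
    simp only [List.foldl_cons, List.any_cons, ih]
    apply Prod.ext <;> simp only [] <;> split_ifs <;> simp_all

-- ===== VERDICT (by name: the statement is the Claim_ definition above) =====
theorem classify_block_py_spec : Claim_equal_classify_block_py := by
  intro lines _
  unfold Spec_classify_block_py classify_block_py classify_block_py_alt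
  simp only [pv_foldl_flags, Bool.false_or]
  split_ifs <;> simp_all
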